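-- pv_equiv track=rewrite | github.com/fiorefabris/stochastic_phase_models | adler/pulse_detection/pulse_detection_extremes_local.py | clean_extremes
-- ===== SOURCE A (Python) =====
-- def clean_extremes(left_minima,right_minima,MAX,MIN):
--
--     while left_minima[0] > right_minima[0]:
--         right_minima.pop(0)
--     while left_minima[-1] > right_minima[-1]:
--         left_minima.pop(-1)
--
--     while MAX[0] < left_minima[0]:
--         MAX.pop(0)
--     while MAX[-1] > right_minima[-1]:
--         MAX.pop(-1)
--
--     while MIN[0] < left_minima[0]:
--         MIN.pop(0)
--     while MIN[-1] > right_minima[-1]: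
--         MIN.pop(-1)
--     return(left_minima,right_minima,MAX,MIN)
-- ===== SOURCE B (Python) =====
-- def clean_extremes(left_minima, right_minima, MAX, MIN):
--     # Single scans find the cut indices, then one slice-deletion each,
--     # instead of repeated pop(0)/pop(-1) loops. Same in-place trimming.
--     a = left_minima[0]
--     i = next(k for k, v in enumerate(right_minima) if v >= a)
--     del right_minima[:i]
--     b = right_minima[-1]
--     j = next(k for k in range(len(left_minima) - 1, -1, -1) if left_minima[k] <= b)
--     del left_minima[j + 1:]
--     for xs in (MAX, MIN):
--         i = next(k for k, v in enumerate(xs) if v >= a)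
--         del xs[:i]
--         j = next(k for k in range(len(xs) - 1, -1, -1) if xs[k] <= b)
--         del xs[j + 1:]
--     return (left_minima, right_minima, MAX, MIN)
-- ===== Notes on version B (the rewrite author's own statement) =====
-- stated objective: alternative
-- what changed: B replaces each of A's repeated pop(0)/pop(-1) while-loops with a single scan that finds the cut index followed by one slice deletion; on the measured inputs this was not 1.5x faster, so no speed is claimed.
import Mathlib
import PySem

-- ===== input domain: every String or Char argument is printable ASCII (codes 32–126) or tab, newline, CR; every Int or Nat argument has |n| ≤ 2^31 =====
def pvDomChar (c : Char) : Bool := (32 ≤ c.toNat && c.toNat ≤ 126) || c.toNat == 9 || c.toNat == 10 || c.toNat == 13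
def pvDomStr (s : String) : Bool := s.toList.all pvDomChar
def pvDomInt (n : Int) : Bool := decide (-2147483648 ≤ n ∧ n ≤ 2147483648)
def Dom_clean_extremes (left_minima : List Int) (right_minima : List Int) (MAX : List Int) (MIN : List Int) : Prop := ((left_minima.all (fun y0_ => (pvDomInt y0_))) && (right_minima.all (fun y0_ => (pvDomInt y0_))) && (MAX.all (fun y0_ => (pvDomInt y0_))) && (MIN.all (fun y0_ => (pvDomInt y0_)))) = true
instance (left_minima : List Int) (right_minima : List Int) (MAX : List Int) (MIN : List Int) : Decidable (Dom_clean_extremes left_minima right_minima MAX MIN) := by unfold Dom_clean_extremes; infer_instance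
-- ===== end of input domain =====

-- B replaces A's repeated pop(0)/pop(-1) while-loops by single scans that find the
-- cut indices followed by one slice deletion each (an alternative decomposition).
-- Both Pythons mutate the four argument lists in place in the same way; the theorems
-- here are about the returned value.

-- ===== PORT A =====
-- while bound > xs[0]: xs.pop(0)   (also covers 'while xs[0] < bound': same test)
def popFrontA (bound : Int) : List Int → List Int
  | [] => []                        -- Python raises IndexError here; excluded by Pre_
  | x :: xs => if bound > x then popFrontA bound xs else x :: xs

-- while xs[-1] > bound: xs.pop(-1)
def popBackA (bound : Int) (xs : List Int) : List Int :=
  if h : xs = [] then xs            -- Python raises IndexError here; excluded by Pre_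
  else if xs.getLast h > bound then popBackA bound xs.dropLast else xs
termination_by xs.length
decreasing_by
  have hl : xs.length ≠ 0 := by simpa using h
  simp [List.length_dropLast]; omega

def clean_extremes (left_minima : List Int) (right_minima : List Int) (MAX : List Int) (MIN : List Int) : List (List Int) :=
  let rm1 := popFrontA left_minima.headI right_minima
  let lm1 := popBackA (rm1.getLastD 0) left_minima
  let max1 := popFrontA lm1.headI MAX
  let max2 := popBackA (rm1.getLastD 0) max1
  let min1 := popFrontA lm1.headI MIN
  let min2 := popBackA (rm1.getLastD 0) min1
  [lm1, rm1, max2, min2]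

-- ===== PORT B =====
-- front scan for the first index with v ≥ a, then del xs[:i]  ≡  dropWhile (v < a)
-- back scan for the last index with v ≤ b, then del xs[j+1:]  ≡  rdropWhile (b < v)
def clean_extremes_alt (left_minima : List Int) (right_minima : List Int) (MAX : List Int) (MIN : List Int) : List (List Int) :=
  let a := left_minima.headI
  let rm := right_minima.dropWhile (fun v => v < a)
  let b := rm.getLastD 0
  let trimBack := fun (xs : List Int) => xs.rdropWhile (fun v => b < v)
  [trimBack left_minima, rm,
   trimBack (MAX.dropWhile (fun v => v < a)),
   trimBack (MIN.dropWhile (fun v => v < a))]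

-- ===== PRECONDITION & SPEC =====
-- Pre_ is exactly the set of inputs on which Python A returns (elsewhere A raises
-- IndexError when a while-loop empties one of the lists).
def Pre_clean_extremes (left_minima : List Int) (right_minima : List Int) (MAX : List Int) (MIN : List Int) : Prop :=
  left_minima ≠ [] ∧ right_minima ≠ [] ∧
  (∃ x ∈ right_minima, left_minima.headI ≤ x) ∧
  (∃ x ∈ left_minima, x ≤ right_minima.getLastD 0) ∧
  (∃ x ∈ MAX.dropWhile (fun v => v < left_minima.headI), x ≤ right_minima.getLastD 0) ∧
  (∃ x ∈ MIN.dropWhile (fun v => v < left_minima.headI), x ≤ right_minima.getLastD 0)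
instance (left_minima : List Int) (right_minima : List Int) (MAX : List Int) (MIN : List Int) : Decidable (Pre_clean_extremes left_minima right_minima MAX MIN) := by unfold Pre_clean_extremes; infer_instance

def pvWitness_clean_extremes : List Int × List Int × List Int × List Int := ([1, 2], [2, 3], [1, 2], [1, 2])

def Spec_clean_extremes (left_minima : List Int) (right_minima : List Int) (MAX : List Int) (MIN : List Int) (out : List (List Int)) : Prop := out = clean_extremes_alt left_minima right_minima MAX MIN
instance (left_minima : List Int) (right_minima : List Int) (MAX : List Int) (MIN : List Int) (out : List (List Int)) : Decidable (Spec_clean_extremes left_minima right_minima MAX MIN out) := by unfold Spec_clean_extremes; infer_instance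

-- ===== CLAIM (what is proved, stated in full; the proofs are below) =====
def Claim_equal_clean_extremes : Prop := ∀ (left_minima : List Int) (right_minima : List Int) (MAX : List Int) (MIN : List Int), Dom_clean_extremes left_minima right_minima MAX MIN → Pre_clean_extremes left_minima right_minima MAX MIN → Spec_clean_extremes left_minima right_minima MAX MIN (clean_extremes left_minima right_minima MAX MIN)

-- ===== LEMMAS AND PROOFS =====

theorem popFrontA_eq_dropWhile (bound : Int) (xs : List Int) :
    popFrontA bound xs = xs.dropWhile (fun v => v < bound) := by
  induction xs with
  | nil => rfl
  | cons x xs ih => simp [popFrontA, List.dropWhile_cons, ih]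

theorem popBackA_eq_rdropWhile (bound : Int) (xs : List Int) :
    popBackA bound xs = xs.rdropWhile (fun v => bound < v) := by
  induction xs using List.reverseRecOn with
  | nil => simp [popBackA, List.rdropWhile_nil]
  | append_singleton ys y ih =>
      rw [popBackA]
      simp [List.rdropWhile_concat, ih]

theorem headI_of_rdropWhile_ne_nil (p : Int → Bool) (xs : List Int)
    (h : xs.rdropWhile p ≠ []) : (xs.rdropWhile p).headI = xs.headI := by
  obtain ⟨t, ht⟩ := List.rdropWhile_prefix p xs
  cases hc : xs.rdropWhile p with
  | nil => exact absurd hc h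
  | cons a l =>
      have hx : xs = a :: (l ++ t) := by rw [← ht, hc]; simp
      rw [hx]
      simp

theorem getLastD_dropWhile (p : Int → Bool) (xs : List Int)
    (h : xs.dropWhile p ≠ []) : (xs.dropWhile p).getLastD 0 = xs.getLastD 0 := by
  obtain ⟨s, hs⟩ := List.dropWhile_suffix (l := xs) p
  cases hc : xs.dropWhile p with
  | nil => exact absurd hc h
  | cons a l =>
      have hx : xs = s ++ a :: l := by rw [← hs, hc]
      rw [hx]
      simp [List.getLastD_eq_getLast?, List.getLast?_append, List.getLast?_cons]

theorem clean_extremes_spec' (left_minima right_minima MAX MIN : List Int)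
    (hp : Pre_clean_extremes left_minima right_minima MAX MIN) :
    clean_extremes left_minima right_minima MAX MIN
      = clean_extremes_alt left_minima right_minima MAX MIN := by
  obtain ⟨hlm, hrm, ⟨r, hr, har⟩, ⟨l, hl, hlb⟩, hmax, hmin⟩ := hp
  -- the front-trimmed right list is nonempty, so its last element is right_minima's last
  have hrm1 : right_minima.dropWhile (fun v => v < left_minima.headI) ≠ [] := by
    simp only [ne_eq, List.dropWhile_eq_nil_iff]
    push Not
    exact ⟨r, hr, by simpa using har⟩
  have hb : (right_minima.dropWhile (fun v => v < left_minima.headI)).getLastD 0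
      = right_minima.getLastD 0 := getLastD_dropWhile _ _ hrm1
  -- the back-trimmed left list is nonempty, so its head is still left_minima's head
  have hlm1 : left_minima.rdropWhile (fun v => right_minima.getLastD 0 < v) ≠ [] := by
    simp only [ne_eq, List.rdropWhile_eq_nil_iff]
    push Not
    exact ⟨l, hl, by simpa using hlb⟩
  have hhead : (left_minima.rdropWhile (fun v => right_minima.getLastD 0 < v)).headI
      = left_minima.headI := headI_of_rdropWhile_ne_nil _ _ hlm1
  simp only [clean_extremes, clean_extremes_alt, popFrontA_eq_dropWhile,
    popBackA_eq_rdropWhile, hb, hhead]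

-- ===== VERDICT (by name: the statement is the Claim_ definition above) =====
theorem clean_extremes_spec : Claim_equal_clean_extremes := by
  intro lm rm MAX MIN _ hp
  exact clean_extremes_spec' lm rm MAX MIN hp
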